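-- pv_equiv track=rewrite | github.com/markbressel/KAB-feladatok | lab1/lab1_fel6.py | caesar_titkosit
-- ===== SOURCE A (Python) =====
-- def create_keyword_alphabet(keyword):
--     # Kulcsszó alapján egyedi ábécé létrehozása
--     keyword = "".join(sorted(set(keyword.upper()), key=lambda x: keyword.upper().index(x)))  # Egyedi betűk, eredeti sorrendben
--     standard_alphabet = "ABCDEFGHIJKLMNOPQRSTUVWXYZ"
--     keyword_alphabet = keyword + "".join(c for c in standard_alphabet if c not in keyword)
--     return keyword_alphabet
--
-- def caesar_titkosit(szoveg, keyword, eltolás):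
--     # Keyword Caesar titkosítás
--     keyword_alphabet = create_keyword_alphabet(keyword)
--     standard_alphabet = "ABCDEFGHIJKLMNOPQRSTUVWXYZ"
--     titkosított = ""
--
--     for karakter in szoveg:
--         if karakter in standard_alphabet:
--             # A standard ábécében lévő pozíció eltolása
--             pozíció = standard_alphabet.index(karakter)
--             új_pozíció = (pozíció + eltolás) % 26
--             titkosított += keyword_alphabet[új_pozíció]
--         else:
--             titkosított += karakter  # Nem betű karakterek változatlanok
--     return titkosított
-- ===== SOURCE B (Python) =====
-- def create_keyword_alphabet(keyword):
--     # Kulcsszó alapján egyedi ábécé létrehozása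
--     keyword = "".join(sorted(set(keyword.upper()), key=lambda x: keyword.upper().index(x)))  # Egyedi betűk, eredeti sorrendben
--     standard_alphabet = "ABCDEFGHIJKLMNOPQRSTUVWXYZ"
--     keyword_alphabet = keyword + "".join(c for c in standard_alphabet if c not in keyword)
--     return keyword_alphabet
--
-- def caesar_titkosit(szoveg, keyword, eltolás):
--     # Alphabet-major staged substitution: instead of translating the text character by
--     # character, make 26 passes — one per alphabet letter — each pass rewriting every
--     # occurrence of that letter (judged against the ORIGINAL text, so already-substituted
--     # characters are never re-substituted) to its shifted keyword-alphabet image.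
--     keyword_alphabet = create_keyword_alphabet(keyword)
--     standard_alphabet = "ABCDEFGHIJKLMNOPQRSTUVWXYZ"
--     out = list(szoveg)
--     for i, letter in enumerate(standard_alphabet):
--         repl = keyword_alphabet[(i + eltolás) % 26]
--         out = [repl if c == letter else o for c, o in zip(szoveg, out)]
--     return "".join(out)
-- ===== Notes on version B (the rewrite author's own statement) =====
-- stated objective: alternative
-- what changed: B inverts the traversal: instead of A's single text-major pass that looks each character up with .index and concatenates strings, B keeps a working copy of the text and makes 26 alphabet-major passes, the pass for letter i rewriting every occurrence of that letter (compared against the original text) to keyword_alphabet[(i+eltolás)%26].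
import Mathlib
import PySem

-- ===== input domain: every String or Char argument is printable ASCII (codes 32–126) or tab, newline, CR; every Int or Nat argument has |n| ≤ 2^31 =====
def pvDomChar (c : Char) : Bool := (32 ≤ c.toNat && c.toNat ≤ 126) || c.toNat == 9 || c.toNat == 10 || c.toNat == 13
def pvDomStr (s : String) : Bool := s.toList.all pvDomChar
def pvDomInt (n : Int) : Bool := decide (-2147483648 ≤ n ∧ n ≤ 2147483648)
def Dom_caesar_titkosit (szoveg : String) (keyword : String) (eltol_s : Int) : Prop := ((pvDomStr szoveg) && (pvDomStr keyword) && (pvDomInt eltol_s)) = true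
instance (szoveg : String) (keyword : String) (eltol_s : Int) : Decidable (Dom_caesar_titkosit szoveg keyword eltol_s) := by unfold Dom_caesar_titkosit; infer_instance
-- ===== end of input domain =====

-- B replaces A's text-major single pass (per-character .index scan + string concatenation)
-- by 26 alphabet-major passes over a working copy of the text; objective: alternative.

-- The 26-letter standard alphabet "ABCDEFGHIJKLMNOPQRSTUVWXYZ" (shared constant of both Pythons).
def pvStd : List Char := "ABCDEFGHIJKLMNOPQRSTUVWXYZ".toList

-- ===== PORT A =====
-- Shared helper (B's Python reuses create_keyword_alphabet verbatim).  Strings are handled as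
-- List Char via PySem.Chars; the single-character test `c not in keyword` (substring test on a
-- 1-character needle) is exactly list membership.  The `.index` in the sort key always succeeds
-- (the set was built from the same string), so the `.getD 0` default is never used.
def create_keyword_alphabet (keyword : String) : List Char :=
  let up := PySem.Chars.upper keyword.toList
  let kw := PySem.List.sorted (PySem.Set.ofList up) (fun c => (PySem.List.index? up c).getD 0) false
  kw ++ pvStd.filter (fun c => !kw.contains c)

-- Port of A: per character, look the position up in the standard alphabet and index the keyword
-- alphabet at the shifted position.  keyword_alphabet always has ≥ 26 characters, so the
-- `keyword_alphabet[új_pozíció]` IndexError is unreachable and the `.getD ' '` default is never used.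
def caesar_titkosit (szoveg : String) (keyword : String) (eltol_s : Int) : String :=
  let ka := create_keyword_alphabet keyword
  String.ofList (szoveg.toList.foldl (fun acc c =>
    if pvStd.contains c then
      acc ++ [(PySem.List.pyGet? ka
        (PySem.Int.mod ((((PySem.List.index? pvStd c).getD 0 : Nat) : Int) + eltol_s) 26)).getD ' ']
    else
      acc ++ [c]) [])

-- ===== PORT B =====
-- Port of B: start from out = list(szoveg); for each (i, letter) in enumerate(standard_alphabet)
-- rebuild out by the comprehension `[repl if c == letter else o for c, o in zip(szoveg, out)]`.
-- As in A, `ka[(i + eltolás) % 26]` cannot raise, so the `.getD ' '` default is never used.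
def caesar_titkosit_alt (szoveg : String) (keyword : String) (eltol_s : Int) : String :=
  let ka := create_keyword_alphabet keyword
  let s := szoveg.toList
  String.ofList ((PySem.List.enumerate pvStd).foldl (fun (out : List Char) (p : Int × Char) =>
    let repl := (PySem.List.pyGet? ka (PySem.Int.mod (p.1 + eltol_s) 26)).getD ' '
    (s.zip out).map (fun q => if q.1 = p.2 then repl else q.2)) s)

-- ===== PRECONDITION & SPEC =====
def Spec_caesar_titkosit (szoveg : String) (keyword : String) (eltol_s : Int) (out : String) : Prop := out = caesar_titkosit_alt szoveg keyword eltol_s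
instance (szoveg : String) (keyword : String) (eltol_s : Int) (out : String) : Decidable (Spec_caesar_titkosit szoveg keyword eltol_s out) := by unfold Spec_caesar_titkosit; infer_instance

-- ===== CLAIM (what is proved, stated in full; the proofs are below) =====
def Claim_equal_caesar_titkosit : Prop := ∀ (szoveg : String) (keyword : String) (eltol_s : Int), Dom_caesar_titkosit szoveg keyword eltol_s → Spec_caesar_titkosit szoveg keyword eltol_s (caesar_titkosit szoveg keyword eltol_s)

-- ===== LEMMAS AND PROOFS =====

-- The shifted image of alphabet position i.
def pvRepl (ka : List Char) (e : Int) (i : Int) : Char :=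
  (PySem.List.pyGet? ka (PySem.Int.mod (i + e) 26)).getD ' '

-- A's per-character step, as a function.
def pvAChar (ka : List Char) (e : Int) (c : Char) : Char :=
  if pvStd.contains c then
    pvRepl ka e (((PySem.List.index? pvStd c).getD 0 : Nat) : Int)
  else c

-- B's pass for one (index, letter) pair, lifted to functions on characters.
def pvStep (ka : List Char) (e : Int) (g : Char → Char) (p : Int × Char) : Char → Char :=
  fun c => if c = p.2 then pvRepl ka e p.1 else g c

-- One comprehension pass on a list of the shape s.map g is a map of the lifted step.
lemma pvPass_eq (s : List Char) (g : Char → Char) (L r : Char) :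
    (s.zip (s.map g)).map (fun q => if q.1 = L then r else q.2)
      = s.map (fun c => if c = L then r else g c) := by
  induction s with
  | nil => rfl
  | cons a t ih => simp only [List.map_cons, List.zip_cons_cons, ih]

-- The whole fold over lists is a map of the fold over functions.
lemma pvFoldB_eq (ka : List Char) (e : Int) (s : List Char) (ps : List (Int × Char))
    (g : Char → Char) :
    ps.foldl (fun (out : List Char) (p : Int × Char) =>
        (s.zip out).map (fun q => if q.1 = p.2 then pvRepl ka e p.1 else q.2)) (s.map g)
      = s.map (ps.foldl (pvStep ka e) g) := by
  induction ps generalizing g with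
  | nil => rfl
  | cons p t ih =>
      simp only [List.foldl_cons, pvPass_eq]
      exact ih (fun c => if c = p.2 then pvRepl ka e p.1 else g c)

-- A character matching none of the processed letters is left as g maps it.
lemma pvFoldFun_not_mem (ka : List Char) (e : Int) (ps : List (Int × Char)) (g : Char → Char)
    (c : Char) (h : c ∉ ps.map Prod.snd) :
    ps.foldl (pvStep ka e) g c = g c := by
  induction ps generalizing g with
  | nil => rfl
  | cons p t ih =>
      simp only [List.map_cons, List.mem_cons, not_or] at h
      rw [List.foldl_cons, ih _ h.2, pvStep, if_neg h.1]

-- A character occurring exactly once among the processed letters gets that letter's image.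
lemma pvFoldFun_mem (ka : List Char) (e : Int) (ps : List (Int × Char)) (g : Char → Char)
    (i : Int) (c : Char) (hmem : (i, c) ∈ ps) (hnd : (ps.map Prod.snd).Nodup) :
    ps.foldl (pvStep ka e) g c = pvRepl ka e i := by
  induction ps generalizing g with
  | nil => cases hmem
  | cons p t ih =>
      simp only [List.map_cons, List.nodup_cons] at hnd
      rcases List.mem_cons.1 hmem with h | h
      · subst h
        rw [List.foldl_cons, pvFoldFun_not_mem ka e t _ c (by simpa using hnd.1)]
        simp [pvStep]
      · exact ih _ h hnd.2

-- A's loop, named: appending one translated character per step is mapping pvAChar.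
lemma pvFold_eq (ka : List Char) (e : Int) (l : List Char) :
    l.foldl (fun acc c =>
      if pvStd.contains c then
        acc ++ [(PySem.List.pyGet? ka
          (PySem.Int.mod ((((PySem.List.index? pvStd c).getD 0 : Nat) : Int) + e) 26)).getD ' ']
      else acc ++ [c]) [] = l.map (pvAChar ka e) := by
  have h := PySem.List.foldl_congr_mem (l := l) (init := ([] : List Char))
    (f := fun acc c =>
      if pvStd.contains c then
        acc ++ [(PySem.List.pyGet? ka
          (PySem.Int.mod ((((PySem.List.index? pvStd c).getD 0 : Nat) : Int) + e) 26)).getD ' ']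
      else acc ++ [c])
    (g := fun acc c => acc ++ [pvAChar ka e c])
    (by intro acc c _; simp only [pvAChar, pvRepl]; split_ifs <;> rfl)
  rw [h, PySem.List.foldl_append_singleton_eq_map, List.nil_append]

-- Per-character agreement: B's 26 staged passes send c where A's single lookup does.
lemma pvChar_eq (ka : List Char) (e : Int) (c : Char) :
    (PySem.List.enumerate pvStd).foldl (pvStep ka e) id c = pvAChar ka e c := by
  have hsnd : (PySem.List.enumerate pvStd).map Prod.snd = pvStd := by decide
  by_cases hc : c ∈ pvStd
  · have hidx : (PySem.List.index? pvStd c).isSome := (PySem.List.index?_isSome_iff _ _).2 hc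
    obtain ⟨j, hj⟩ : ∃ j, PySem.List.index? pvStd c = some j := Option.isSome_iff_exists.1 hidx
    obtain ⟨hjlt, hje, -⟩ := PySem.List.getElem_of_index?_eq_some hj
    have hmem : ((j : Int), c) ∈ PySem.List.enumerate pvStd := by
      rw [PySem.List.mem_enumerate_iff]
      exact ⟨j, hjlt, by simp [hje]⟩
    rw [pvFoldFun_mem ka e _ id (j : Int) c hmem (by rw [hsnd]; decide),
      pvAChar, if_pos (by simpa using hc), hj]
    rfl
  · rw [pvFoldFun_not_mem ka e _ id c (by rwa [hsnd]),
      pvAChar, if_neg (by simpa using hc)]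
    rfl

-- ===== VERDICT (by name: the statement is the Claim_ definition above) =====
theorem caesar_titkosit_spec : Claim_equal_caesar_titkosit := by
  intro szoveg keyword e _
  show caesar_titkosit szoveg keyword e = caesar_titkosit_alt szoveg keyword e
  simp only [caesar_titkosit, caesar_titkosit_alt]
  rw [pvFold_eq (create_keyword_alphabet keyword) e szoveg.toList]
  have hB := pvFoldB_eq (create_keyword_alphabet keyword) e szoveg.toList
    (PySem.List.enumerate pvStd) id
  simp only [List.map_id, pvRepl] at hB
  rw [hB]
  exact congrArg String.ofList (List.map_congr_left fun c _ =>
    (pvChar_eq (create_keyword_alphabet keyword) e c).symm)
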